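-- pv_equiv track=rewrite | github.com/FunnyWolf/agentic-soc-platform | tests/test_cwe89_splunk_injection.py | _spl_clause_would_inject
-- ===== SOURCE A (Python) =====
-- def _spl_clause_would_inject(clause: str) -> bool:
--     """
--     Walk through the clause tracking SPL quote context.
--     A pipe (|) outside of a properly-quoted string means injection.
--     """
--     in_quote = False
--     i = 0
--     while i < len(clause):
--         c = clause[i]
--         if c == '"':
--             if in_quote:
--                 # Check for doubled quote (escaped)
--                 if i + 1 < len(clause) and clause[i + 1] == '"':
--                     i += 2
--                     continue
--                 else:
--                     in_quote = False
--             else: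
--                 in_quote = True
--         elif c == '|' and not in_quote:
--             return True
--         i += 1
--     return False
-- ===== SOURCE B (Python) =====
-- def _spl_clause_would_inject(clause: str) -> bool:
--     # Collapse escaped ("") quotes, then split on '"': even-indexed parts are
--     # outside quotes; a pipe there means injection.
--     parts = clause.replace('""', '').split('"')
--     return any('|' in part for i, part in enumerate(parts) if i % 2 == 0)
-- ===== Notes on version B (the rewrite author's own statement) =====
-- stated objective: idiomatic
-- what changed: Replaced the per-character quote-tracking state machine with a preprocess-then-split pipeline: collapse doubled-quote escapes with str.replace, split on the quote character, and test the even-indexed (outside-quote) segments for a pipe.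
import Mathlib
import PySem

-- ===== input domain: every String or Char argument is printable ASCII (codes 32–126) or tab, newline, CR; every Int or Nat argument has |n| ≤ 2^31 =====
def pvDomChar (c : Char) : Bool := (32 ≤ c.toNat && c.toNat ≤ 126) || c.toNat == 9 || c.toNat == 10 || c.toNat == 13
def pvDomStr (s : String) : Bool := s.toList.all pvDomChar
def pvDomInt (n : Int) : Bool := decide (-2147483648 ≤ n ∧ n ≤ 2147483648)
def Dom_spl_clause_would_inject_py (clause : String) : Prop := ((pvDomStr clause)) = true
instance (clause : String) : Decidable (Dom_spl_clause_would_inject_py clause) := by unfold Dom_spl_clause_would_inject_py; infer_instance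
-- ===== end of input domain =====

-- B replaces A's per-character quote-tracking state machine by an idiomatic
-- preprocess-then-split pipeline (collapse "" escapes, split on '"', test
-- even-indexed segments for '|'); proved to return the same Bool on every input.


-- ===== PORT A =====
-- A's while-loop over index i with the in_quote flag, as recursion on the
-- remaining characters (the 'i += 2' escape step consumes two characters).
def splAuxA : List Char → Bool → Bool
  | [], _ => false
  | c :: rest, inq =>
    if c = '"' then
      if inq then
        -- check for doubled quote (escaped): i + 1 < len(clause) and clause[i+1] == '"'
        match rest with
        | '"' :: rest2 => splAuxA rest2 true
        | [] => splAuxA [] false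
        | c2 :: rest2 => splAuxA (c2 :: rest2) false
      else splAuxA rest true
    else if c == '|' && !inq then true
    else splAuxA rest inq
  termination_by l _ => l.length
  decreasing_by all_goals (simp only [List.length_cons, List.length_nil]; omega)

def spl_clause_would_inject_py (clause : String) : Bool :=
  splAuxA clause.toList false

-- ===== PORT B =====
-- Source B: parts = clause.replace('""', '').split('"');
--       any('|' in part for i, part in enumerate(parts) if i % 2 == 0)
def spl_clause_would_inject_py_alt (clause : String) : Bool :=
  let parts := PySem.Chars.splitOn (PySem.Chars.replace clause.toList ['"', '"'] []) ['"']
  (PySem.List.enumerate parts).any fun ip => (PySem.Int.mod ip.1 2 == 0) && PySem.Chars.isIn ['|'] ip.2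

-- ===== PRECONDITION & SPEC =====
def Spec_spl_clause_would_inject_py (clause : String) (out : Bool) : Prop := out = spl_clause_would_inject_py_alt clause
instance (clause : String) (out : Bool) : Decidable (Spec_spl_clause_would_inject_py clause out) := by unfold Spec_spl_clause_would_inject_py; infer_instance

-- ===== CLAIM (what is proved, stated in full; the proofs are below) =====
def Claim_equal_spl_clause_would_inject_py : Prop := ∀ (clause : String), Dom_spl_clause_would_inject_py clause → Spec_spl_clause_would_inject_py clause (spl_clause_would_inject_py clause)

-- ===== LEMMAS AND PROOFS =====

-- Proof-side model of clause.replace('""', ''): drop leftmost-first doubled quotes.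
def rmQQ : List Char → List Char
  | '"' :: '"' :: t => rmQQ t
  | c :: t => c :: rmQQ t
  | [] => []

-- Proof-side model of s.split('"').
def splitQ : List Char → List (List Char)
  | '"' :: t => [] :: splitQ t
  | c :: t =>
    match splitQ t with
    | h :: tl => (c :: h) :: tl
    | [] => [[c]]   -- unreachable: splitQ is never empty
  | [] => [[]]

-- Escape-free quote FSM (runs on the replace-normalised string).
def fsmQ : List Char → Bool → Bool
  | [], _ => false
  | '"' :: t, q => fsmQ t (!q)
  | c :: t, q => if c == '|' && !q then true else fsmQ t q

-- Alternating pipe test over segments: o = currently outside quotes.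
def segAny : Bool → List (List Char) → Bool
  | _, [] => false
  | o, s :: ss => (o && PySem.Chars.isIn ['|'] s) || segAny (!o) ss

-- step lemmas for splAuxA
theorem A_qq_true (r : List Char) : splAuxA ('"' :: '"' :: r) true = splAuxA r true := by
  rw [splAuxA.eq_2]; simp

theorem A_q_true_ne {c2 : Char} (r : List Char) (h : c2 ≠ '"') :
    splAuxA ('"' :: c2 :: r) true = splAuxA (c2 :: r) false := by
  rw [splAuxA.eq_4 true '"' c2 r (fun hh => h hh)]; simp

theorem A_q_false (t : List Char) : splAuxA ('"' :: t) false = splAuxA t true := by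
  match t with
  | [] => rw [splAuxA.eq_3]; simp
  | '"' :: r => rw [splAuxA.eq_2]; simp
  | c2 :: r =>
    by_cases hc2 : c2 = '"'
    · subst hc2; rw [splAuxA.eq_2]; simp
    · rw [splAuxA.eq_4 false '"' c2 r (fun hh => hc2 hh)]; simp

theorem A_ne {c : Char} (t : List Char) (q : Bool) (h : c ≠ '"') :
    splAuxA (c :: t) q = if c == '|' && !q then true else splAuxA t q := by
  match t with
  | [] => rw [splAuxA.eq_3]; simp [h]
  | '"' :: r => rw [splAuxA.eq_2]; simp [h]
  | c2 :: r =>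
    by_cases hc2 : c2 = '"'
    · subst hc2; rw [splAuxA.eq_2]; simp [h]
    · rw [splAuxA.eq_4 q c c2 r (fun hh => hc2 hh)]; simp [h]

-- step lemmas for rmQQ
theorem rmQQ_ne {c : Char} (t : List Char) (h : c ≠ '"') :
    rmQQ (c :: t) = c :: rmQQ t :=
  rmQQ.eq_2 c t (fun _ hc _ => h hc)

theorem rmQQ_q_ne {c : Char} (t : List Char) (h : c ≠ '"') :
    rmQQ ('"' :: c :: t) = '"' :: rmQQ (c :: t) :=
  rmQQ.eq_2 '"' (c :: t) (fun _ _ hh => absurd (List.cons_eq_cons.mp hh).1 h)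

theorem splitQ_ne {c : Char} {t h : List Char} {tl : List (List Char)}
    (hc : c ≠ '"') (ht : splitQ t = h :: tl) :
    splitQ (c :: t) = (c :: h) :: tl := by
  rw [splitQ.eq_2 c t (fun hh => hc hh), ht]

theorem splitQ_ne_nil (l : List Char) : splitQ l ≠ [] := by
  induction l with
  | nil => simp [splitQ]
  | cons c t ih =>
    by_cases h : c = '"'
    · subst h; rw [splitQ.eq_1]; simp
    · rcases ht : splitQ t with _ | ⟨h', tl⟩
      · exact absurd ht ih
      · rw [splitQ_ne h ht]; simp

theorem replace_go_eq (fuel : Nat) (l acc : List Char) (h : l.length ≤ fuel) :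
    PySem.Chars.replace.go ['"', '"'] [] fuel l acc = acc.reverse ++ rmQQ l := by
  induction fuel generalizing l acc with
  | zero =>
    have hl : l = [] := by cases l <;> simp_all
    subst hl
    simp [PySem.Chars.replace.go, rmQQ]
  | succ fuel ih =>
    rcases l with _ | ⟨c, t⟩
    · simp [PySem.Chars.replace.go, rmQQ]
    · by_cases hc : c = '"'
      · subst hc
        rcases t with _ | ⟨c2, t2⟩
        · rw [PySem.Chars.replace.go]
          rw [if_neg (by simp [List.isPrefixOf])]
          rw [ih [] _ (by simp)]
          simp [rmQQ]
        · by_cases hc2 : c2 = '"'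
          · subst hc2
            rw [PySem.Chars.replace.go]
            rw [if_pos (by simp [List.isPrefixOf])]
            have hd : List.drop (['"', '"'] : List Char).length ('"' :: '"' :: t2) = t2 := by simp
            rw [hd]
            simp only [List.reverse_nil, List.nil_append]
            rw [ih t2 acc (by simp at h; omega), rmQQ.eq_1]
          · rw [PySem.Chars.replace.go]
            rw [if_neg (by simp [List.isPrefixOf]; exact fun hh => hc2 hh.symm)]
            rw [ih (c2 :: t2) _ (by simp at h; simp; omega)]
            rw [rmQQ_q_ne _ hc2]
            simp
      · rw [PySem.Chars.replace.go]
        rw [if_neg (by simp [List.isPrefixOf]; intro hh; exact (hc hh.symm).elim)]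
        rw [ih t _ (by simp at h; omega)]
        rw [rmQQ_ne _ hc]
        simp

theorem replace_eq_rmQQ (l : List Char) :
    PySem.Chars.replace l ['"', '"'] [] = rmQQ l := by
  rw [PySem.Chars.replace]
  rw [if_neg (by simp)]
  exact replace_go_eq l.length l [] le_rfl

theorem splitOn_go_eq (fuel : Nat) (l cur : List Char) (acc : List (List Char))
    (h : l.length < fuel) :
    PySem.Chars.splitOn.go ['"'] fuel l cur acc
      = acc.reverse ++ ((cur.reverse ++ (splitQ l).headI) :: (splitQ l).tail) := by
  induction fuel generalizing l cur acc with
  | zero => omega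
  | succ fuel ih =>
    rcases l with _ | ⟨c, t⟩
    · simp [PySem.Chars.splitOn.go, splitQ]
    · by_cases hc : c = '"'
      · subst hc
        rw [PySem.Chars.splitOn.go]
        rw [if_pos (by simp [List.isPrefixOf])]
        have hd : List.drop (['"'] : List Char).length ('"' :: t) = t := by simp
        rw [hd]
        rw [ih t [] (cur.reverse :: acc) (by simp at h; omega)]
        rw [splitQ.eq_1]
        rcases hs : splitQ t with _ | ⟨h', tl⟩
        · exact absurd hs (splitQ_ne_nil t)
        · simp
      · rw [PySem.Chars.splitOn.go]
        rw [if_neg (by simp [List.isPrefixOf]; exact fun hh => hc hh.symm)]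
        rw [ih t (c :: cur) acc (by simp at h; omega)]
        rcases hs : splitQ t with _ | ⟨h', tl⟩
        · exact absurd hs (splitQ_ne_nil t)
        · rw [splitQ_ne hc hs]
          simp

theorem splitOn_eq_splitQ (l : List Char) :
    PySem.Chars.splitOn l ['"'] = splitQ l := by
  rw [PySem.Chars.splitOn]
  rw [splitOn_go_eq (l.length + 1) l [] [] (by omega)]
  rcases hs : splitQ l with _ | ⟨h', tl⟩
  · exact absurd hs (splitQ_ne_nil l)
  · simp

theorem isIn_pipe_cons (c : Char) (s : List Char) :
    PySem.Chars.isIn ['|'] (c :: s) = (c == '|' || PySem.Chars.isIn ['|'] s) := by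
  rw [Bool.eq_iff_iff, PySem.Chars.isIn_iff_infix, List.singleton_infix_iff, List.mem_cons,
    Bool.or_eq_true, beq_iff_eq, PySem.Chars.isIn_iff_infix, List.singleton_infix_iff]
  constructor
  · rintro (h | h)
    · exact Or.inl h.symm
    · exact Or.inr h
  · rintro (h | h)
    · exact Or.inl h.symm
    · exact Or.inr h

-- A leading quote in the normalised string just toggles the FSM state.
theorem fsmQ_rmQQ_quote (r : List Char) (q : Bool) :
    fsmQ (rmQQ ('"' :: r)) q = fsmQ (rmQQ r) (!q) := by
  induction r generalizing q with
  | nil =>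
    have : rmQQ ['"'] = ['"'] := by decide
    rw [this, fsmQ.eq_2, rmQQ.eq_3]
  | cons c t ih =>
    by_cases hc : c = '"'
    · subst hc
      rw [rmQQ.eq_1, ih, Bool.not_not]
    · rw [rmQQ_q_ne _ hc, rmQQ_ne _ hc, fsmQ.eq_2]

-- A's FSM equals the escape-free FSM on the normalised string.
theorem splAuxA_eq_fsmQ : ∀ (n : Nat) (l : List Char), l.length ≤ n →
    ∀ q, splAuxA l q = fsmQ (rmQQ l) q := by
  intro n
  induction n with
  | zero =>
    intro l hl q
    have : l = [] := by cases l <;> simp_all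
    subst this; rw [splAuxA.eq_1, rmQQ.eq_3, fsmQ.eq_1]
  | succ n ih =>
    intro l hl q
    rcases l with _ | ⟨c, t⟩
    · rw [splAuxA.eq_1, rmQQ.eq_3, fsmQ.eq_1]
    · by_cases hc : c = '"'
      · subst hc
        cases q with
        | false =>
          rw [A_q_false, ih t (by simp at hl; omega) true, fsmQ_rmQQ_quote]
          rfl
        | true =>
          rcases t with _ | ⟨c2, t2⟩
          · have h1 : splAuxA ['"'] true = false := by rw [splAuxA.eq_3]; simp [splAuxA.eq_1]
            have h2 : rmQQ ['"'] = ['"'] := by decide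
            rw [h1, h2, fsmQ.eq_2, fsmQ.eq_1]
          · by_cases hc2 : c2 = '"'
            · subst hc2
              rw [A_qq_true, ih t2 (by simp at hl; omega) true, rmQQ.eq_1]
            · rw [A_q_true_ne _ hc2, ih (c2 :: t2) (by simp at hl; simp; omega) false,
                fsmQ_rmQQ_quote]
              rfl
      · rw [A_ne t q hc, rmQQ_ne _ hc, fsmQ.eq_3 q c (rmQQ t) (fun hh => hc hh),
          ih t (by simp at hl; omega) q]

-- The escape-free FSM equals the alternating segment test over the split.
theorem fsmQ_eq_segAny (l : List Char) : ∀ q, fsmQ l q = segAny (!q) (splitQ l) := by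
  induction l with
  | nil => intro q; cases q <;> decide
  | cons c t ih =>
    intro q
    by_cases hc : c = '"'
    · subst hc
      rw [splitQ.eq_1, fsmQ.eq_2, ih (!q), segAny]
      have : PySem.Chars.isIn ['|'] [] = false := by decide
      simp [this]
    · rcases hs : splitQ t with _ | ⟨h', tl⟩
      · exact absurd hs (splitQ_ne_nil t)
      · rw [splitQ_ne hc hs, fsmQ.eq_3 q c t (fun hh => hc hh), ih q, hs]
        by_cases hp : c = '|'
        · cases q <;> simp [segAny, isIn_pipe_cons, hp]
        · have hb : (c == '|') = false := by simp [hp]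
          cases q <;> simp [segAny, isIn_pipe_cons, hb]

-- The enumerate/parity any-loop equals the alternating segment test.
theorem enumerate_any_eq_segAny (ss : List (List Char)) : ∀ (n : Int),
    ((PySem.List.enumerate ss n).any fun ip =>
        (PySem.Int.mod ip.1 2 == 0) && PySem.Chars.isIn ['|'] ip.2)
      = segAny (PySem.Int.mod n 2 == 0) ss := by
  induction ss with
  | nil => intro n; simp [PySem.List.enumerate, segAny]
  | cons s ss ih =>
    intro n
    have he : PySem.List.enumerate (s :: ss) n = (n, s) :: PySem.List.enumerate ss (n + 1) := rfl
    rw [he]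
    simp only [List.any_cons, ih (n + 1)]
    have hpar : (PySem.Int.mod (n + 1) 2 == 0) = !(PySem.Int.mod n 2 == 0) := by
      rw [PySem.Int.mod_eq_emod_of_pos (by omega), PySem.Int.mod_eq_emod_of_pos (by omega),
        Bool.eq_iff_iff]
      simp
      omega
    rw [hpar, segAny]

-- ===== VERDICT (by name: the statement is the Claim_ definition above) =====
theorem spl_clause_would_inject_py_spec : Claim_equal_spl_clause_would_inject_py := by
  intro clause _
  unfold Spec_spl_clause_would_inject_py spl_clause_would_inject_py spl_clause_would_inject_py_alt
  rw [replace_eq_rmQQ, splitOn_eq_splitQ, enumerate_any_eq_segAny,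
    splAuxA_eq_fsmQ clause.toList.length clause.toList le_rfl, fsmQ_eq_segAny]
  norm_num
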